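-- pv_equiv track=rewrite | github.com/LeaderMalang/read-academic | OCRAPP/services/studentName.py | extract_student_name
-- ===== SOURCE A (Python) =====
-- def extract_student_name(cleaned_texts):
--     extracted_info = {
--         "certified_name": None,
--     }
--
--     # Array to store lines containing 'TOTAL'
--     for i, text in enumerate(cleaned_texts):
--
--         if "RESULT CARD" in text:
--             certified_name_index = i + 1
--             extracted_info["certified_name"] = cleaned_texts[certified_name_index].strip()
--
--     return extracted_info
-- ===== SOURCE B (Python) =====
-- def extract_student_name(cleaned_texts):
--     certified_name = None
--     for i, text in reversed(list(enumerate(cleaned_texts))):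
--         if "RESULT CARD" in text:
--             certified_name = cleaned_texts[i + 1].strip()
--             break
--     return {"certified_name": certified_name}
-- ===== Notes on version B (the rewrite author's own statement) =====
-- stated objective: alternative
-- what changed: B scans the list in reverse and stops at the first 'RESULT CARD' hit (the last one in forward order), instead of A's full forward sweep that overwrites the name on every hit.
import Mathlib
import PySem

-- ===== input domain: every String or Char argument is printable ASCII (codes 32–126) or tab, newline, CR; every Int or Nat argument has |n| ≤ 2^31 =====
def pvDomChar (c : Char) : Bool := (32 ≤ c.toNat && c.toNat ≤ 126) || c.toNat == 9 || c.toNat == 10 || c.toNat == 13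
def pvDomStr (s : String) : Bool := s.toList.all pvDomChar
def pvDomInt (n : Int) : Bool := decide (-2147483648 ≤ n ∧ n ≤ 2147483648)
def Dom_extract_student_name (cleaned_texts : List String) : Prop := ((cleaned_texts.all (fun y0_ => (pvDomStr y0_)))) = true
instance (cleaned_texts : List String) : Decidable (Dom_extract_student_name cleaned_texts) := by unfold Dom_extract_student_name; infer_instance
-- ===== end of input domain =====

-- B replaces A's full forward sweep (which overwrites the name on every 'RESULT CARD' hit)
-- by a reverse scan that stops at the first hit; same return value, 'alternative' objective.

-- ===== PORT A =====
-- cleaned_texts[i+1].strip(); Python raises IndexError when i+1 is out of range, the port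
-- returns "".strip() there — exactly those inputs are excluded by Pre_extract_student_name.
def pvNameAt (cleaned_texts : List String) (i : Int) : Option String :=
  some (PySem.Str.strip ((PySem.List.pyGet? cleaned_texts (i + 1)).getD ""))

def extract_student_name (cleaned_texts : List String) : List (String × Option String) :=
  let info : PySem.Dict String (Option String) := PySem.Dict.ofList [("certified_name", none)]
  let info := (PySem.List.enumerate cleaned_texts).foldl
    (fun d p =>
      if PySem.Str.isIn "RESULT CARD" p.2 then
        d.insert "certified_name" (pvNameAt cleaned_texts p.1)
      else d) info
  info.items

-- ===== PORT B =====
-- the 'for … in reversed(list(enumerate(cleaned_texts))) … break' loop of Source B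
def pvRevScan (cleaned_texts : List String) : List (Int × String) → Option String
  | [] => none
  | p :: rest =>
    if PySem.Str.isIn "RESULT CARD" p.2 then pvNameAt cleaned_texts p.1
    else pvRevScan cleaned_texts rest

def extract_student_name_alt (cleaned_texts : List String) : List (String × Option String) :=
  [("certified_name", pvRevScan cleaned_texts (PySem.List.enumerate cleaned_texts).reverse)]

-- ===== PRECONDITION & SPEC =====
-- Pre_ excludes exactly the inputs where Python A raises IndexError: the last element
-- contains 'RESULT CARD', so cleaned_texts[i+1] is out of range at the last hit.
def Pre_extract_student_name (cleaned_texts : List String) : Prop :=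
  cleaned_texts.getLast?.all (fun s => !PySem.Str.isIn "RESULT CARD" s) = true

instance (cleaned_texts : List String) : Decidable (Pre_extract_student_name cleaned_texts) := by
  unfold Pre_extract_student_name; infer_instance

def pvWitness_extract_student_name : List String := ["x", "RESULT CARD", "  John Doe "]

def Spec_extract_student_name (cleaned_texts : List String) (out : List (String × Option String)) : Prop := out = extract_student_name_alt cleaned_texts
instance (cleaned_texts : List String) (out : List (String × Option String)) : Decidable (Spec_extract_student_name cleaned_texts out) := by unfold Spec_extract_student_name; infer_instance

-- ===== CLAIM (what is proved, stated in full; the proofs are below) =====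
def Claim_equal_extract_student_name : Prop := ∀ (cleaned_texts : List String), Dom_extract_student_name cleaned_texts → Pre_extract_student_name cleaned_texts → Spec_extract_student_name cleaned_texts (extract_student_name cleaned_texts)

-- ===== LEMMAS AND PROOFS =====

-- overwriting the single key of a one-entry dict
theorem pv_insert_single (v w : Option String) :
    (PySem.Dict.ofList [("certified_name", v)]).insert "certified_name" w
      = PySem.Dict.ofList [("certified_name", w)] := by
  rfl

-- first match of an appended scan list
theorem pvRevScan_append (ct : List String) (l₁ l₂ : List (Int × String)) :
    pvRevScan ct (l₁ ++ l₂)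
      = match pvRevScan ct l₁ with
        | some w => some w
        | none => pvRevScan ct l₂ := by
  induction l₁ with
  | nil => simp [pvRevScan]
  | cons p rest ih =>
    simp only [List.cons_append, pvRevScan]
    split
    · rfl
    · exact ih

-- the forward fold keeping the last hit equals the reverse scan taking the first hit
theorem pv_fold_eq_rev (ct : List String) (ps : List (Int × String)) (v : Option String) :
    ps.foldl (fun acc p => if PySem.Str.isIn "RESULT CARD" p.2 then pvNameAt ct p.1 else acc) v
      = match pvRevScan ct ps.reverse with
        | some w => some w
        | none => v := by
  induction ps generalizing v with
  | nil => simp [pvRevScan]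
  | cons p rest ih =>
    simp only [List.foldl_cons, List.reverse_cons, pvRevScan_append, ih]
    cases hr : pvRevScan ct rest.reverse with
    | some w => rfl
    | none =>
      simp only [pvRevScan]
      split <;> rfl

-- the dict stays a one-entry dict throughout A's fold
theorem pv_fold_dict (ct : List String) (ps : List (Int × String)) (v : Option String) :
    ps.foldl (fun d p => if PySem.Str.isIn "RESULT CARD" p.2 then
        d.insert "certified_name" (pvNameAt ct p.1) else d)
      (PySem.Dict.ofList [("certified_name", v)])
      = PySem.Dict.ofList [("certified_name",
          ps.foldl (fun acc p => if PySem.Str.isIn "RESULT CARD" p.2 then pvNameAt ct p.1 else acc) v)] := by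
  induction ps generalizing v with
  | nil => rfl
  | cons p rest ih =>
    simp only [List.foldl_cons]
    split
    · rw [pv_insert_single]; exact ih _
    · exact ih _

-- ===== VERDICT (by name: the statement is the Claim_ definition above) =====
theorem extract_student_name_spec : Claim_equal_extract_student_name := by
  intro ct _ _
  unfold Spec_extract_student_name extract_student_name extract_student_name_alt
  simp only [pv_fold_dict, pv_fold_eq_rev]
  cases hr : pvRevScan ct (PySem.List.enumerate ct).reverse <;> rfl
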